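-- pv_equiv track=rewrite | github.com/oigomezz/Retos | Retos-2023/Reto-47/solution.py | where_is_the_robot
-- ===== SOURCE A (Python) =====
-- class Direction:
--     POSITIVEY = "POSITIVEY"
--     NEGATIVEX = "NEGATIVEX"
--     NEGATIVEY = "NEGATIVEY"
--     POSITIVEX = "POSITIVEX"
--
--     def __init__(self, direction):
--         self.direction_to = direction
--
--     def turn(self):
--         if self.direction_to == Direction.POSITIVEY:
--             self.direction_to = Direction.NEGATIVEX
--         elif self.direction_to == Direction.NEGATIVEX:
--             self.direction_to = Direction.NEGATIVEY
--         elif self.direction_to == Direction.NEGATIVEY: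
--             self.direction_to = Direction.POSITIVEX
--         elif self.direction_to == Direction.POSITIVEX:
--             self.direction_to = Direction.POSITIVEY
--
-- def where_is_the_robot(steps):
--     x = 0
--     y = 0
--     direction = Direction(Direction.POSITIVEY)
--
--     for step in steps:
--         if direction.direction_to == Direction.POSITIVEY:
--             y += step
--         elif direction.direction_to == Direction.NEGATIVEX:
--             x -= step
--         elif direction.direction_to == Direction.NEGATIVEY:
--             y -= step
--         elif direction.direction_to == Direction.POSITIVEX:
--             x += step
--
--         direction.turn()
--
--     return f"x: {x}, y: {y}, direction: {direction.direction_to}"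
-- ===== SOURCE B (Python) =====
-- def where_is_the_robot(steps):
--     # Process steps four at a time by index: each full cycle of 4 steps nets
--     # x += fourth - second, y += first - third, and the heading returns to
--     # POSITIVEY; the 0..3 leftover steps then fix the final direction.
--     n = len(steps)
--     x = 0
--     y = 0
--     i = 0
--     while i + 4 <= n:
--         x += steps[i + 3] - steps[i + 1]
--         y += steps[i] - steps[i + 2]
--         i += 4
--     rem = n - i
--     if rem >= 1:
--         y += steps[i]
--     if rem >= 2:
--         x -= steps[i + 1]
--     if rem >= 3:
--         y -= steps[i + 2]
--     direction = ["POSITIVEY", "NEGATIVEX", "NEGATIVEY", "POSITIVEX"][rem]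
--     return f"x: {x}, y: {y}, direction: {direction}"
-- ===== Notes on version B (the rewrite author's own statement) =====
-- stated objective: faster
-- what changed: B drops the mutable Direction object and per-step turning: it consumes the steps four at a time by index (each full cycle nets x += fourth - second, y += first - third and restores the heading), applies the 0-3 leftover steps, and reads the final direction off the leftover count.
import Mathlib
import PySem

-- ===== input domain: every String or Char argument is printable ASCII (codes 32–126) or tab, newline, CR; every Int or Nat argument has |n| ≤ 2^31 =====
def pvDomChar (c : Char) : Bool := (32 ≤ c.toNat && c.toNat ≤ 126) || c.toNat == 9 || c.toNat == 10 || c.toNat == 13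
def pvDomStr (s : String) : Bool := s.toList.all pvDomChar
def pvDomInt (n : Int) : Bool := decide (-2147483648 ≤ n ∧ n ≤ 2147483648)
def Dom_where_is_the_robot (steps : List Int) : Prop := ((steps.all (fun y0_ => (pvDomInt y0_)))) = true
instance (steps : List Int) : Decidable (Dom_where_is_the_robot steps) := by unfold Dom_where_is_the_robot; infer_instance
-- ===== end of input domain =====

-- B processes steps four at a time by index with no direction state (alternative decomposition); return value only.

-- ===== PORT A =====
-- Direction.turn, transliterated (direction as its String name)
def robotTurn (d : String) : String :=
  if d = "POSITIVEY" then "NEGATIVEX"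
  else if d = "NEGATIVEX" then "NEGATIVEY"
  else if d = "NEGATIVEY" then "POSITIVEX"
  else if d = "POSITIVEX" then "POSITIVEY"
  else d

-- body of A's for-loop: update (x, y, direction) for one step, then turn
def robotStep (st : Int × Int × String) (step : Int) : Int × Int × String :=
  let (x, y, d) := st
  let (x, y) :=
    if d = "POSITIVEY" then (x, y + step)
    else if d = "NEGATIVEX" then (x - step, y)
    else if d = "NEGATIVEY" then (x, y - step)
    else if d = "POSITIVEX" then (x + step, y)
    else (x, y)
  (x, y, robotTurn d)

def where_is_the_robot (steps : List Int) : String :=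
  let (x, y, d) := steps.foldl robotStep (0, 0, "POSITIVEY")
  "x: " ++ PySem.Int.toStr x ++ ", y: " ++ PySem.Int.toStr y ++ ", direction: " ++ d

-- ===== PORT B =====
-- the while-loop of Source B: while i + 4 <= n, consume the chunk at i; returns (x, y, i).
-- Python's steps[k] here is always in range (the guard ensures k ≤ i+3 < n), so
-- List.getD k 0 computes exactly what steps[k] does on every reached index.
def altIdx (steps : List Int) (x y : Int) (i : Nat) : Int × Int × Nat :=
  if i + 4 ≤ steps.length then
    altIdx steps (x + (steps.getD (i + 3) 0 - steps.getD (i + 1) 0))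
                 (y + (steps.getD i 0 - steps.getD (i + 2) 0)) (i + 4)
  else (x, y, i)
termination_by steps.length - i

def where_is_the_robot_alt (steps : List Int) : String :=
  let n := steps.length
  let (x, y, i) := altIdx steps 0 0 0
  let rem := n - i
  let y := if rem ≥ 1 then y + steps.getD i 0 else y
  let x := if rem ≥ 2 then x - steps.getD (i + 1) 0 else x
  let y := if rem ≥ 3 then y - steps.getD (i + 2) 0 else y
  let d := ["POSITIVEY", "NEGATIVEX", "NEGATIVEY", "POSITIVEX"].getD rem ""
  "x: " ++ PySem.Int.toStr x ++ ", y: " ++ PySem.Int.toStr y ++ ", direction: " ++ d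

-- ===== PRECONDITION & SPEC =====
def Spec_where_is_the_robot (steps : List Int) (out : String) : Prop := out = where_is_the_robot_alt steps
instance (steps : List Int) (out : String) : Decidable (Spec_where_is_the_robot steps out) := by unfold Spec_where_is_the_robot; infer_instance

-- ===== CLAIM (what is proved, stated in full; the proofs are below) =====
def Claim_equal_where_is_the_robot : Prop := ∀ (steps : List Int), Dom_where_is_the_robot steps → Spec_where_is_the_robot steps (where_is_the_robot steps)

-- ===== LEMMAS AND PROOFS =====

-- cons-shaped view of B's loop, used only by the proofs
def altLoopC (x y : Int) : List Int → Int × Int × List Int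
  | a :: b :: c :: d :: rest => altLoopC (x + (d - b)) (y + (a - c)) rest
  | rest => (x, y, rest)

theorem altLoopC_short (x y : Int) (l : List Int) (h : l.length < 4) :
    altLoopC x y l = (x, y, l) := by
  match l, h with
  | [], _ => rfl
  | [_], _ => rfl
  | [_, _], _ => rfl
  | [_, _, _], _ => rfl
  | _ :: _ :: _ :: _ :: _, h => (simp only [List.length_cons] at h; omega)

-- A's fold over a full chunk of four returns to direction POSITIVEY with the chunk's net move
theorem foldA_chunk (x y : Int) (a b c d : Int) (rest : List Int) :
    (a :: b :: c :: d :: rest).foldl robotStep (x, y, "POSITIVEY")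
      = rest.foldl robotStep (x + (d - b), y + (a - c), "POSITIVEY") := by
  have h1 : x - b + d = x + (d - b) := by ring
  have h2 : y + a - c = y + (a - c) := by ring
  simp [List.foldl, robotStep, robotTurn, h1, h2]

-- A's whole fold from POSITIVEY equals the fold over altLoopC's residue from altLoopC's state
theorem foldA_altLoopC (steps : List Int) (x y : Int) :
    steps.foldl robotStep (x, y, "POSITIVEY")
      = (altLoopC x y steps).2.2.foldl robotStep ((altLoopC x y steps).1, (altLoopC x y steps).2.1, "POSITIVEY") := by
  induction x, y, steps using altLoopC.induct with
  | case1 x y a b c d rest ih =>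
      rw [foldA_chunk, altLoopC]
      exact ih
  | case2 x y rest h =>
      rw [altLoopC.eq_def]
      split
      · exact absurd rfl (h _ _ _ _ _)
      · rfl

-- altLoopC's residue has fewer than four elements
theorem altLoopC_residue_short (x y : Int) (steps : List Int) :
    (altLoopC x y steps).2.2.length < 4 := by
  induction x, y, steps using altLoopC.induct with
  | case1 x y a b c d rest ih => rw [altLoopC]; exact ih
  | case2 x y rest h =>
      rw [altLoopC.eq_def]
      split
      · exact absurd rfl (h _ _ _ _ _)
      · match rest, h with
        | [], _ => simp
        | [_], _ => simp
        | [_, _], _ => simp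
        | [_, _, _], _ => simp
        | _ :: _ :: _ :: _ :: _, h => exact absurd rfl (h _ _ _ _ _)

-- a full chunk sits at index i of steps when i + 4 ≤ length
theorem drop_chunk (steps : List Int) (i : Nat) (h : i + 4 ≤ steps.length) :
    steps.drop i = steps.getD i 0 :: steps.getD (i + 1) 0 :: steps.getD (i + 2) 0
      :: steps.getD (i + 3) 0 :: steps.drop (i + 4) := by
  have e0 : steps.drop i = steps[i] :: steps.drop (i + 1) := List.drop_eq_getElem_cons (by omega)
  have e1 : steps.drop (i + 1) = steps[i + 1] :: steps.drop (i + 2) := List.drop_eq_getElem_cons (by omega)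
  have e2 : steps.drop (i + 2) = steps[i + 2] :: steps.drop (i + 3) := List.drop_eq_getElem_cons (by omega)
  have e3 : steps.drop (i + 3) = steps[i + 3] :: steps.drop (i + 4) := List.drop_eq_getElem_cons (by omega)
  rw [e0, e1, e2, e3]
  simp [List.getD_eq_getElem?_getD, List.getElem?_eq_getElem, (by omega : i < steps.length),
        (by omega : i + 1 < steps.length), (by omega : i + 2 < steps.length), (by omega : i + 3 < steps.length)]

-- the index loop computes the cons loop's state, and its final index marks the residue suffix
theorem altIdx_eq_fuel (steps : List Int) (fuel : Nat) : ∀ (x y : Int) (i : Nat),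
    steps.length - i ≤ fuel → i ≤ steps.length →
    altIdx steps x y i
      = ((altLoopC x y (steps.drop i)).1, (altLoopC x y (steps.drop i)).2.1,
         steps.length - (altLoopC x y (steps.drop i)).2.2.length)
    ∧ steps.drop (steps.length - (altLoopC x y (steps.drop i)).2.2.length)
        = (altLoopC x y (steps.drop i)).2.2 := by
  induction fuel with
  | zero =>
      intro x y i hf hi
      have hi' : i = steps.length := by omega
      rw [altIdx, if_neg (by omega)]
      have hlen : (steps.drop i).length < 4 := by rw [List.length_drop]; omega
      rw [altLoopC_short _ _ _ hlen]
      have h2 : steps.length - (steps.drop i).length = i := by rw [List.length_drop]; omega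
      rw [h2]
      exact ⟨rfl, rfl⟩
  | succ fuel ih =>
      intro x y i hf hi
      rw [altIdx]
      split_ifs with h4
      · rw [drop_chunk steps i h4, altLoopC]
        exact ih _ _ (i + 4) (by omega) (by omega)
      · have hlen : (steps.drop i).length < 4 := by rw [List.length_drop]; omega
        rw [altLoopC_short _ _ _ hlen]
        have h2 : steps.length - (steps.drop i).length = i := by rw [List.length_drop]; omega
        rw [h2]
        exact ⟨rfl, rfl⟩

theorem altIdx_eq (steps : List Int) (x y : Int) (i : Nat) (hi : i ≤ steps.length) :
    altIdx steps x y i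
      = ((altLoopC x y (steps.drop i)).1, (altLoopC x y (steps.drop i)).2.1,
         steps.length - (altLoopC x y (steps.drop i)).2.2.length)
    ∧ steps.drop (steps.length - (altLoopC x y (steps.drop i)).2.2.length)
        = (altLoopC x y (steps.drop i)).2.2 :=
  altIdx_eq_fuel steps (steps.length - i) x y i (by omega) hi

-- reading at an offset into the residue suffix
theorem getD_suffix (steps rest : List Int) (j k : Nat) (h : steps.drop j = rest) :
    steps.getD (j + k) 0 = rest.getD k 0 := by
  have : steps[j + k]? = rest[k]? := by rw [← h, List.getElem?_drop]
  simp [List.getD_eq_getElem?_getD, this]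

-- ===== VERDICT (by name: the statement is the Claim_ definition above) =====
theorem where_is_the_robot_spec : Claim_equal_where_is_the_robot := by
  intro steps _
  show where_is_the_robot steps = where_is_the_robot_alt steps
  unfold where_is_the_robot where_is_the_robot_alt
  rw [foldA_altLoopC steps 0 0]
  obtain ⟨heq, hsuf⟩ := altIdx_eq steps 0 0 0 (by omega)
  rw [List.drop_zero] at heq hsuf
  rw [heq]
  have hshort := altLoopC_residue_short 0 0 steps
  generalize hA : altLoopC 0 0 steps = r at hshort hsuf ⊢
  obtain ⟨x, y, rest⟩ := r
  simp only [] at hshort hsuf ⊢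
  have hrle : rest.length ≤ steps.length := by
    have := congrArg List.length hsuf
    simp [List.length_drop] at this
    omega
  have hrem : steps.length - (steps.length - rest.length) = rest.length := by omega
  rw [hrem]
  have hg : ∀ k, steps.getD (steps.length - rest.length + k) 0 = rest.getD k 0 :=
    fun k => getD_suffix steps rest _ k hsuf
  match rest, hshort with
  | [], _ => simp [List.foldl]
  | [a], _ =>
      have h0 := hg 0
      simp at h0
      simp [List.foldl, robotStep, robotTurn, h0]
  | [a, b], _ =>
      have h0 := hg 0
      have h1 := hg 1
      simp at h0 h1
      simp [List.foldl, robotStep, robotTurn, h0, h1]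
  | [a, b, c], _ =>
      have h0 := hg 0
      have h1 := hg 1
      have h2 := hg 2
      simp at h0 h1 h2
      simp [List.foldl, robotStep, robotTurn, h0, h1, h2]
  | _ :: _ :: _ :: _ :: _, h => (simp only [List.length_cons] at h; omega)
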